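-- pv_equiv track=rewrite | github.com/WWFYOcelot/NLPTest | maskchecktest.py | compare_with_mask
-- ===== SOURCE A (Python) =====
-- def compare_with_mask(str1, str2):
--     parts = str2.split("<mask>")
--     pos = 0
--
--     for part in parts:
--         if part:
--             pos = str1.find(part, pos)
--             if pos == -1:
--                 return False
--             pos += len(part)
--
--     return True
-- ===== SOURCE B (Python) =====
-- def compare_with_mask(str1, str2):
--     def consume(s, p):
--         while True:
--             if s.startswith(p):
--                 return s[len(p):]
--             if not s:
--                 return None
--             s = s[1:]
--     s = str1
--     for p in [q for q in str2.split("<mask>") if q]: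
--         s = consume(s, p)
--         if s is None:
--             return False
--     return True
-- ===== Notes on version B (the rewrite author's own statement) =====
-- stated objective: alternative
-- what changed: A's single loop over all split parts calling str.find with a moving position index is replaced by a pre-filter of the empty parts plus an explicit character-level consume helper that peels one character of str1 at a time until the current part is a prefix, returning the remaining suffix.
import Mathlib
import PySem

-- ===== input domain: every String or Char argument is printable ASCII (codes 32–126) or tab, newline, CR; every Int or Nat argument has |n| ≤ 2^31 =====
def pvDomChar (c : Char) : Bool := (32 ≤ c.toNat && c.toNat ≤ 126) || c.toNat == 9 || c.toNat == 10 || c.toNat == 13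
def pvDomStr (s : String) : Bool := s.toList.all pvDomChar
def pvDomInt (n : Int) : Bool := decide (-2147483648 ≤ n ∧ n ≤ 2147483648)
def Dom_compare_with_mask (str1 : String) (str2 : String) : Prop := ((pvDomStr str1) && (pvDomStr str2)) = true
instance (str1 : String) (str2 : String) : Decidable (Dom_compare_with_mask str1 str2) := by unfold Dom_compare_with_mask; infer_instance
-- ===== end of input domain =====

-- B replaces A's per-part str.find loop with a pre-filter of the empty parts plus an explicit
-- character-level consume helper that peels str1 one character at a time (objective: alternative).

-- ===== PORT A =====
-- A's for-loop over the parts, carrying the moving position `pos`; early return False on a failed find.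
def pvALoop (s : List Char) (parts : List (List Char)) (pos : Int) : Bool :=
  match parts with
  | [] => true
  | p :: rest =>
    if p ≠ [] then
      let pos' := PySem.Chars.findFrom s p pos none
      if pos' = -1 then false
      else pvALoop s rest (pos' + p.length)
    else pvALoop s rest pos

def compare_with_mask (str1 : String) (str2 : String) : Bool :=
  pvALoop str1.toList (PySem.Chars.splitOn str2.toList "<mask>".toList) 0

-- ===== PORT B =====
-- B's consume helper: peel one leading character of s at a time until p is a prefix,
-- then return the suffix after p (none if s runs out).
def pvConsume (s p : List Char) : Option (List Char) :=
  if p.isPrefixOf s then some (s.drop p.length)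
  else
    match s with
    | [] => none
    | _ :: t => pvConsume t p

-- B's for-loop over the pre-filtered non-empty parts, threading the remaining suffix.
def pvBFold (s : List Char) (parts : List (List Char)) : Bool :=
  match parts with
  | [] => true
  | p :: rest =>
    match pvConsume s p with
    | none => false
    | some s' => pvBFold s' rest

def compare_with_mask_alt (str1 : String) (str2 : String) : Bool :=
  pvBFold str1.toList
    ((PySem.Chars.splitOn str2.toList "<mask>".toList).filter (fun p => !p.isEmpty))

-- ===== PRECONDITION & SPEC =====
def Spec_compare_with_mask (str1 : String) (str2 : String) (out : Bool) : Prop := out = compare_with_mask_alt str1 str2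
instance (str1 : String) (str2 : String) (out : Bool) : Decidable (Spec_compare_with_mask str1 str2 out) := by unfold Spec_compare_with_mask; infer_instance

-- ===== CLAIM (what is proved, stated in full; the proofs are below) =====
def Claim_equal_compare_with_mask : Prop := ∀ (str1 : String) (str2 : String), Dom_compare_with_mask str1 str2 → Spec_compare_with_mask str1 str2 (compare_with_mask str1 str2)

-- ===== LEMMAS AND PROOFS =====

-- A minimal occurrence is where find points.
lemma pvFind_eq_of (s p : List Char) (n : Nat) (h1 : p <+: s.drop n)
    (h2 : ∀ i < n, ¬ p <+: s.drop i) : PySem.Chars.find s p = (n : Int) := by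
  have hin : PySem.Chars.find s p ≠ -1 := by
    rw [PySem.Chars.find_ne_neg_one_iff]
    exact List.IsInfix.trans h1.isInfix (List.drop_suffix n s).isInfix
  have hge : 0 ≤ PySem.Chars.find s p := by
    have := PySem.Chars.neg_one_le_find s p; omega
  obtain ⟨hpre, hmin⟩ := PySem.Chars.find_spec (s := s) (sub := p) hge
  have : (PySem.Chars.find s p).toNat = n := by
    by_contra hne
    rcases Nat.lt_or_ge (PySem.Chars.find s p).toNat n with hlt | hge2
    · exact h2 _ hlt hpre
    · exact hmin n (by omega) h1
  omega

-- B's consume, phrased with find: it returns the suffix after the first occurrence.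
lemma pvConsume_eq (p : List Char) (hp : p ≠ []) : ∀ (s : List Char),
    pvConsume s p =
      if PySem.Chars.find s p = -1 then none
      else some (s.drop ((PySem.Chars.find s p).toNat + p.length)) := by
  intro s
  induction s with
  | nil =>
    have hfind : PySem.Chars.find [] p = -1 := by
      rw [PySem.Chars.find_eq_neg_one_iff]
      intro hinf
      exact hp (List.eq_nil_of_infix_nil hinf)
    rw [pvConsume, if_neg (by simp [List.prefix_nil, hp]), hfind]
    simp
  | cons c t ih =>
    by_cases hpre : p <+: c :: t
    · have hfind : PySem.Chars.find (c :: t) p = 0 :=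
        pvFind_eq_of _ _ 0 (by simpa using hpre) (by omega)
      rw [pvConsume, if_pos (List.isPrefixOf_iff_prefix.mpr hpre), hfind]
      simp
    · rw [pvConsume, if_neg (by simpa [List.isPrefixOf_iff_prefix] using hpre)]
      rw [ih]
      by_cases hft : PySem.Chars.find t p = -1
      · have hf : PySem.Chars.find (c :: t) p = -1 := by
          rw [PySem.Chars.find_eq_neg_one_iff] at hft ⊢
          intro hinf
          rcases List.infix_cons_iff.mp hinf with h | h
          · exact hpre h
          · exact hft h
        rw [hft, hf]
        simp
      · have hge : 0 ≤ PySem.Chars.find t p := by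
          have := PySem.Chars.neg_one_le_find t p; omega
        obtain ⟨htpre, htmin⟩ := PySem.Chars.find_spec (s := t) (sub := p) hge
        set n := (PySem.Chars.find t p).toNat with hn
        have hf : PySem.Chars.find (c :: t) p = ((n + 1 : Nat) : Int) := by
          apply pvFind_eq_of
          · simpa using htpre
          · intro i hi
            match i with
            | 0 => simpa using hpre
            | (k + 1) =>
              simpa using htmin k (by omega)
        rw [if_neg hft, hf, if_neg (by omega)]
        have hcast : (((n + 1 : Nat) : Int)).toNat = n + 1 := by omega
        have hdd : List.drop (n + 1 + p.length) (c :: t) = List.drop (n + p.length) t := by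
          rw [show n + 1 + p.length = (n + p.length) + 1 by omega, List.drop_succ_cons]
        rw [hcast, hdd]

-- Loop invariant: A's loop at position k equals B's fold on the k-suffix of s
-- over the non-empty parts.
lemma pvLoop_eq (s : List Char) (parts : List (List Char)) :
    ∀ (k : Nat), k ≤ s.length →
      pvALoop s parts (k : Int) = pvBFold (s.drop k) (parts.filter (fun p => !p.isEmpty)) := by
  induction parts with
  | nil => intro k hk; simp [pvALoop, pvBFold]
  | cons p rest ih =>
    intro k hk
    by_cases hp : p = []
    · subst hp
      simpa [pvALoop, List.filter] using ih k hk
    · rw [pvALoop]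
      simp only [hp, if_pos, ne_eq, not_false_eq_true]
      rw [PySem.Chars.findFrom_natCast s p k hk]
      have hfil : (p :: rest).filter (fun p => !p.isEmpty)
          = p :: rest.filter (fun p => !p.isEmpty) := by
        have hpe : p.isEmpty = false := by simp [hp]
        simp [List.filter, hpe]
      rw [hfil]
      have hcons := pvConsume_eq p hp (s.drop k)
      by_cases hfind : PySem.Chars.find (s.drop k) p = -1
      · simp [pvBFold, hcons, hfind]
      · simp only [pvBFold, hcons, hfind, if_false]
        have hge : 0 ≤ PySem.Chars.find (s.drop k) p := by
          have := PySem.Chars.neg_one_le_find (s.drop k) p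
          omega
        set i := PySem.Chars.find (s.drop k) p with hi
        have hpos : (k : Int) + i ≠ -1 := by omega
        rw [if_neg hpos]
        have hpre : p <+: (s.drop k).drop i.toNat := (PySem.Chars.find_spec hge).1
        have hplen : p.length ≤ ((s.drop k).drop i.toNat).length := hpre.length_le
        have hnext : k + i.toNat + p.length ≤ s.length := by
          have hp0 : 0 < p.length := List.length_pos_iff.mpr hp
          have h1 : p.length ≤ s.length - (k + i.toNat) := by
            simpa [List.length_drop] using hplen
          have h2 : i ≤ ((s.drop k).length : Int) := PySem.Chars.find_le_length (s.drop k) p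
          have h3 : (s.drop k).length = s.length - k := by simp [List.length_drop]
          omega
        have hcast : (k : Int) + i + (p.length : Int)
            = ((k + i.toNat + p.length : Nat) : Int) := by omega
        rw [hcast, ih (k + i.toNat + p.length) hnext]
        rw [List.drop_drop, Nat.add_assoc]

-- ===== VERDICT (by name: the statement is the Claim_ definition above) =====
theorem compare_with_mask_spec : Claim_equal_compare_with_mask := by
  intro str1 str2 _
  unfold Spec_compare_with_mask compare_with_mask compare_with_mask_alt
  simpa using pvLoop_eq str1.toList (PySem.Chars.splitOn str2.toList "<mask>".toList) 0 (Nat.zero_le _)
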